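-- pv_equiv track=rewrite | github.com/MohamadHijazi28/Natural-language-processing-NLP | nlp-1/processing_knesset_corpus.py | get_all_text_to_person
-- ===== SOURCE A (Python) =====
-- def get_all_text_to_person(dialog_list):
--     persons_text = {}
--     for entry in dialog_list:
--         person_name = entry['person']
--         person_text = entry['text']
--         if person_name not in persons_text:
--             persons_text[person_name] = person_text
--         else:
--             persons_text[person_name] += '\n' + person_text
--
--     return persons_text
-- ===== SOURCE B (Python) =====
-- def get_all_text_to_person(dialog_list):
--     fragments = {}
--     for entry in dialog_list:
--         fragments.setdefault(entry['person'], []).append(entry['text'])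
--     return {person: '\n'.join(texts) for person, texts in fragments.items()}
-- ===== Notes on version B (the rewrite author's own statement) =====
-- stated objective: idiomatic
-- what changed: Two-pass decomposition: first collect each person's text fragments into lists via setdefault (no first/else branch), then join each list with newlines in a comprehension, instead of progressive string += with a first-occurrence special case.
import Mathlib
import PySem

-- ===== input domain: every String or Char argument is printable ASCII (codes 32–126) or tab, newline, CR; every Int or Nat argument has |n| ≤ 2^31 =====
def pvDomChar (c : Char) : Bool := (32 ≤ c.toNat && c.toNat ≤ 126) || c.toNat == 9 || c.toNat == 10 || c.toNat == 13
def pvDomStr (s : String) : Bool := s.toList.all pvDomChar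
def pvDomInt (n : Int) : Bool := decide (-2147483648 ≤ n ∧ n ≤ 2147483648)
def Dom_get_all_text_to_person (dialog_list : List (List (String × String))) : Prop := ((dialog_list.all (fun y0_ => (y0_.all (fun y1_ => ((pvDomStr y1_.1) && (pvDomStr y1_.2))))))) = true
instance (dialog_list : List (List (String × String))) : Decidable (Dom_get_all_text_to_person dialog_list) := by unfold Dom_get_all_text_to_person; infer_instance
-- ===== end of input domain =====

-- B replaces A's progressive `+=` concatenation (with a first-occurrence special case) by a
-- two-pass decomposition: group the text fragments per person into lists, then join each with '\n'.

-- entry['person'] / entry['text']: first-match lookup; the .getD "" only totalizes the port,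
-- Pre_ guarantees the key is present (Python raises KeyError otherwise).
def pvPerson (entry : List (String × String)) : String := (entry.lookup "person").getD ""
def pvText (entry : List (String × String)) : String := (entry.lookup "text").getD ""

-- ===== PORT A =====
def get_all_text_to_person (dialog_list : List (List (String × String))) : List (String × String) :=
  (dialog_list.foldl (fun persons_text entry =>
      let person_name := pvPerson entry
      let person_text := pvText entry
      if persons_text.contains person_name = false then
        persons_text.insert person_name person_text
      else
        persons_text.insert person_name (persons_text.getD person_name "" ++ "\n" ++ person_text))
    (PySem.Dict.empty : PySem.Dict String String)).items

-- ===== PORT B =====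
def get_all_text_to_person_alt (dialog_list : List (List (String × String))) : List (String × String) :=
  ((dialog_list.foldl (fun fragments entry =>
      fragments.modify (pvPerson entry) [] (· ++ [pvText entry]))
    (PySem.Dict.empty : PySem.Dict String (List String))).items).map
    (fun p => (p.1, PySem.Str.join "\n" p.2))

-- ===== PRECONDITION & SPEC =====
-- Pre_ excludes exactly the entries missing a 'person' or 'text' key, where Python A raises KeyError.
def Pre_get_all_text_to_person (dialog_list : List (List (String × String))) : Prop :=
  ∀ entry ∈ dialog_list, (entry.lookup "person").isSome ∧ (entry.lookup "text").isSome
instance (dialog_list : List (List (String × String))) : Decidable (Pre_get_all_text_to_person dialog_list) := by unfold Pre_get_all_text_to_person; infer_instance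

def pvWitness_get_all_text_to_person : (List (List (String × String))) :=
  [[("person", "alice"), ("text", "hello")], [("person", "bob"), ("text", "hi")], [("person", "alice"), ("text", "bye")]]

def Spec_get_all_text_to_person (dialog_list : List (List (String × String))) (out : List (String × String)) : Prop := out = get_all_text_to_person_alt dialog_list
instance (dialog_list : List (List (String × String))) (out : List (String × String)) : Decidable (Spec_get_all_text_to_person dialog_list out) := by unfold Spec_get_all_text_to_person; infer_instance

-- ===== CLAIM (what is proved, stated in full; the proofs are below) =====
def Claim_equal_get_all_text_to_person : Prop := ∀ (dialog_list : List (List (String × String))), Dom_get_all_text_to_person dialog_list → Pre_get_all_text_to_person dialog_list → Spec_get_all_text_to_person dialog_list (get_all_text_to_person dialog_list)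

-- ===== LEMMAS AND PROOFS =====

-- A's loop step over one entry, and its insert-normal form
def pvStepA (d : PySem.Dict String String) (e : List (String × String)) : PySem.Dict String String :=
  if d.contains (pvPerson e) = false then d.insert (pvPerson e) (pvText e)
  else d.insert (pvPerson e) (d.getD (pvPerson e) "" ++ "\n" ++ pvText e)

def pvStepB (d : PySem.Dict String (List String)) (e : List (String × String)) : PySem.Dict String (List String) :=
  d.modify (pvPerson e) [] (· ++ [pvText e])

lemma pvStepA_insert_form (d : PySem.Dict String String) (e : List (String × String)) :
    pvStepA d e = d.insert (pvPerson e)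
      (if d.contains (pvPerson e) = false then pvText e
       else d.getD (pvPerson e) "" ++ "\n" ++ pvText e) := by
  unfold pvStepA; split_ifs <;> rfl

lemma pv_join_singleton (t : String) : PySem.Str.join "\n" [t] = t := by
  simp [PySem.Str.join, PySem.Chars.join_singleton, String.ofList_toList]

lemma pv_chars_join_snoc (sep : List Char) (ts : List (List Char)) (t : List Char) (h : ts ≠ []) :
    PySem.Chars.join sep (ts ++ [t]) = PySem.Chars.join sep ts ++ sep ++ t := by
  induction ts with
  | nil => exact absurd rfl h
  | cons a rest ih =>
    cases rest with
    | nil => simp [PySem.Chars.join_cons_cons, PySem.Chars.join_singleton]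
    | cons b r =>
      have ih' := ih (by simp)
      rw [List.cons_append] at ih'
      rw [List.cons_append, List.cons_append, PySem.Chars.join_cons_cons, ih',
        PySem.Chars.join_cons_cons]
      simp [List.append_assoc]

lemma pv_join_snoc (ts : List String) (t : String) (h : ts ≠ []) :
    PySem.Str.join "\n" (ts ++ [t]) = PySem.Str.join "\n" ts ++ "\n" ++ t := by
  simp only [PySem.Str.join, List.map_append, List.map_cons, List.map_nil]
  rw [pv_chars_join_snoc _ _ _ (by simpa using h), String.ofList_append, String.ofList_append]
  simp [String.ofList_toList]

-- the loop invariant: A's running dict is B's running dict joined, pointwise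
lemma pv_inv (l : List (List (String × String))) (dA : PySem.Dict String String)
    (dB : PySem.Dict String (List String))
    (hc : ∀ k, dA.contains k = dB.contains k)
    (hne : ∀ k, dB.contains k = true → dB.getD k [] ≠ [])
    (hv : ∀ k, dA.getD k "" = PySem.Str.join "\n" (dB.getD k [])) :
    ∀ k, (l.foldl pvStepA dA).getD k "" = PySem.Str.join "\n" ((l.foldl pvStepB dB).getD k []) := by
  induction l generalizing dA dB with
  | nil => exact hv
  | cons e l ih =>
    simp only [List.foldl_cons]
    apply ih
    · intro k
      rw [pvStepA_insert_form]
      simp [pvStepB, PySem.Dict.contains_insert, PySem.Dict.contains_modify, hc k]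
    · intro k hk
      by_cases hkp : k = pvPerson e
      · simp [pvStepB, hkp]
      · have h1 : dB.contains k = true := by
          simpa [pvStepB, PySem.Dict.contains_modify, hkp] using hk
        simp only [pvStepB, PySem.Dict.getD_modify, if_neg hkp]
        exact hne k h1
    · intro k
      rw [pvStepA_insert_form]
      simp only [pvStepB, PySem.Dict.getD_insert, PySem.Dict.getD_modify]
      by_cases hkp : k = pvPerson e
      · rw [if_pos hkp, if_pos hkp]
        by_cases hcp : dA.contains (pvPerson e) = false
        · have hb : dB.contains (pvPerson e) = false := (hc (pvPerson e)).symm.trans hcp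
          rw [if_pos hcp, PySem.Dict.getD_of_not_contains dB [] hb]
          simp [pv_join_singleton]
        · have hcp' : dA.contains (pvPerson e) = true := by
            revert hcp; cases dA.contains (pvPerson e) <;> simp
          have hb : dB.contains (pvPerson e) = true := (hc (pvPerson e)).symm.trans hcp'
          rw [if_neg hcp, hv (pvPerson e), pv_join_snoc _ _ (hne (pvPerson e) hb)]
      · rw [if_neg hkp, if_neg hkp]
        exact hv k

lemma pv_main (dialog_list : List (List (String × String))) :
    get_all_text_to_person dialog_list = get_all_text_to_person_alt dialog_list := by
  unfold get_all_text_to_person get_all_text_to_person_alt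
  have hA : (fun (persons_text : PySem.Dict String String) (entry : List (String × String)) =>
      let person_name := pvPerson entry
      let person_text := pvText entry
      if persons_text.contains person_name = false then
        persons_text.insert person_name person_text
      else
        persons_text.insert person_name (persons_text.getD person_name "" ++ "\n" ++ person_text))
      = pvStepA := rfl
  have hB : (fun (fragments : PySem.Dict String (List String)) (entry : List (String × String)) =>
      fragments.modify (pvPerson entry) [] (· ++ [pvText entry]))
      = pvStepB := rfl
  rw [hA, hB]
  have hA' : pvStepA = fun (d : PySem.Dict String String) (e : List (String × String)) =>
      d.insert (pvPerson e)
        ((fun (d : PySem.Dict String String) (e : List (String × String)) =>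
          if d.contains (pvPerson e) = false then pvText e
          else d.getD (pvPerson e) "" ++ "\n" ++ pvText e) d e) :=
    funext fun d => funext fun e => pvStepA_insert_form d e
  have hB' : pvStepB = fun (d : PySem.Dict String (List String)) (e : List (String × String)) =>
      d.modify (pvPerson e)
        [] ((fun (_ : PySem.Dict String (List String)) (e : List (String × String))
              (v : List String) => v ++ [pvText e]) d e) := rfl
  have hkA : (dialog_list.foldl pvStepA PySem.Dict.empty).keys
      = PySem.Set.update ([] : List String) (dialog_list.map pvPerson) := by
    rw [hA', PySem.Dict.keys_foldl_insert_key dialog_list pvPerson _ _, PySem.Dict.keys_empty]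
  have hkB : (dialog_list.foldl pvStepB PySem.Dict.empty).keys
      = PySem.Set.update ([] : List String) (dialog_list.map pvPerson) := by
    rw [hB', PySem.Dict.keys_foldl_modify_key dialog_list pvPerson [] _ _, PySem.Dict.keys_empty]
  have hndA : (dialog_list.foldl pvStepA PySem.Dict.empty).keys.Nodup := by
    rw [hA']
    exact PySem.Dict.nodup_keys_foldl_insert_key dialog_list pvPerson _ _ PySem.Dict.nodup_keys_empty
  have hndB : (dialog_list.foldl pvStepB PySem.Dict.empty).keys.Nodup := by
    rw [hB']
    exact PySem.Dict.nodup_keys_foldl_modify_key dialog_list pvPerson [] _ _ PySem.Dict.nodup_keys_empty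
  rw [PySem.Dict.items_eq_map_keys _ hndA "", PySem.Dict.items_eq_map_keys _ hndB [],
    hkA, hkB, List.map_map]
  apply List.map_congr_left
  intro k _
  simp only [Function.comp]
  refine congrArg (Prod.mk k) ?_
  exact pv_inv dialog_list PySem.Dict.empty PySem.Dict.empty
    (fun k => by simp [PySem.Dict.contains_empty])
    (fun k hk => by simp [PySem.Dict.contains_empty] at hk)
    (fun k => by simp [PySem.Dict.getD_empty, PySem.Str.join, PySem.Chars.join, List.intercalate]) k

-- ===== VERDICT (by name: the statement is the Claim_ definition above) =====
theorem get_all_text_to_person_spec : Claim_equal_get_all_text_to_person := by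
  intro dialog_list _ _
  unfold Spec_get_all_text_to_person
  exact pv_main dialog_list
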